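-- pv_equiv track=rewrite | github.com/litecoin-project/litecoin | contrib/release/gitian-verify.py | consensus_hashes
-- ===== SOURCE A (Python) =====
-- from collections import defaultdict
--
-- def consensus_hashes(manifests):
--     by_file = defaultdict(dict)
--     for signer, hashes in manifests.items():
--         for filename, digest in hashes.items():
--             by_file[filename][signer] = digest
--
--     agreed = {}
--     mismatches = {}
--     for filename, signer_hashes in sorted(by_file.items()):
--         unique_hashes = set(signer_hashes.values())
--         if len(unique_hashes) == 1:
--             agreed[filename] = next(iter(unique_hashes))
--         else:
--             mismatches[filename] = signer_hashes
--     return agreed, mismatches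
-- ===== SOURCE B (Python) =====
-- def consensus_hashes(manifests):
--     triples = [(f, s, d) for s, hashes in manifests.items() for f, d in hashes.items()]
--     triples.sort(key=lambda t: t[0])  # stable sort: signer order survives inside each file's run
--     groups = []
--     for f, s, d in triples:
--         if groups and groups[-1][0] == f:
--             groups[-1][1].append((s, d))
--         else:
--             groups.append((f, [(s, d)]))
--     agreed = {}
--     mismatches = {}
--     for filename, pairs in groups:
--         signer_hashes = dict(pairs)
--         digests = set(signer_hashes.values())
--         if len(digests) == 1:
--             agreed[filename] = next(iter(digests))
--         else:
--             mismatches[filename] = signer_hashes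
--     return agreed, mismatches
-- ===== Notes on version B (the rewrite author's own statement) =====
-- stated objective: alternative
-- what changed: B drops A's defaultdict-of-dicts index: it flattens the manifests into (filename, signer, digest) triples, stably sorts them by filename only, splits the sorted list into runs of equal filename in one pass, and classifies each run.
import Mathlib
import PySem

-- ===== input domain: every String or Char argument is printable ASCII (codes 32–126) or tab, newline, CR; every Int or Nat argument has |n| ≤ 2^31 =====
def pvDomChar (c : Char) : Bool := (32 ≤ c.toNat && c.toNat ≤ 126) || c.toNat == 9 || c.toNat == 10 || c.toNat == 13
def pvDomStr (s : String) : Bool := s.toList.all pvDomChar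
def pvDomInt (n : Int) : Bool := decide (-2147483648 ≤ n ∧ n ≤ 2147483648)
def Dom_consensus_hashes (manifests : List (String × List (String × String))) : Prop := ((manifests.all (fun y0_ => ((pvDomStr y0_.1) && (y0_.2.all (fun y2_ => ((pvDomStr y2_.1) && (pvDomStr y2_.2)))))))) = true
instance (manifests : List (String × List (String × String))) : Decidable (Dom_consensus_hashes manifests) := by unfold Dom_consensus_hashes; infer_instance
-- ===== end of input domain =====

-- B replaces A's defaultdict-of-dicts index by flattening the manifests into (filename, signer,
-- digest) triples, stably sorting them by filename, and splitting the result into runs (objective: alternative).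


-- ===== PORT A =====
-- 'manifests' is a Python dict of dicts: both levels are iterated with duplicate keys collapsed
-- exactly as dict(...) does (last value wins, first position kept) via PySem.Dict.ofList.
def consensus_hashes (manifests : List (String × List (String × String))) : (List (String × String)) × (List (String × List (String × String))) :=
  let by_file : PySem.Dict String (PySem.Dict String String) :=
    (PySem.Dict.ofList manifests).items.foldl (fun bf sh =>
      (PySem.Dict.ofList sh.2).items.foldl (fun bf fd =>
        bf.insert fd.1 ((bf.getD fd.1 PySem.Dict.empty).insert sh.1 fd.2)) bf)
      PySem.Dict.empty
  -- sorted(by_file.items()): the filenames are distinct dict keys, so Python's tuple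
  -- comparison never reaches the (unorderable) dict values: it is the stable sort by filename.
  let items := PySem.List.sorted by_file.items (fun p => p.1) false
  let res := items.foldl (fun acc p =>
      let unique := PySem.Set.ofList p.2.values
      if PySem.Set.len unique == 1 then
        -- next(iter(unique)): the set is a singleton here, so iteration order cannot matter
        (acc.1.insert p.1 (unique.headD ""), acc.2)
      else (acc.1, acc.2.insert p.1 p.2))
    ((PySem.Dict.empty : PySem.Dict String String), (PySem.Dict.empty : PySem.Dict String (PySem.Dict String String)))
  (res.1.items, res.2.items.map (fun p => (p.1, p.2.items)))

-- ===== PORT B =====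
def consensus_hashes_alt (manifests : List (String × List (String × String))) : (List (String × String)) × (List (String × List (String × String))) :=
  -- [(f, s, d) for s, hashes in manifests.items() for f, d in hashes.items()]
  let triples : List (String × String × String) :=
    (PySem.Dict.ofList manifests).items.flatMap (fun sh =>
      (PySem.Dict.ofList sh.2).items.map (fun fd => (fd.1, sh.1, fd.2)))
  -- triples.sort(key=lambda t: t[0]) — stable
  let sortedTriples := PySem.List.sorted triples (fun t => t.1) false
  -- one pass: append to the last run while the filename repeats, else open a new run
  let groups : List (String × List (String × String)) :=
    sortedTriples.foldl (fun gs t =>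
      match gs.getLast? with
      | some last =>
          if last.1 == t.1 then gs.dropLast ++ [(last.1, last.2 ++ [(t.2.1, t.2.2)])]
          else gs ++ [(t.1, [(t.2.1, t.2.2)])]
      | none => [(t.1, [(t.2.1, t.2.2)])]) []
  groups.foldl (fun acc g =>
      let signer_hashes := PySem.Dict.ofList g.2
      let digests := PySem.Set.ofList signer_hashes.values
      if PySem.Set.len digests == 1 then
        -- next(iter(digests)): singleton set, iteration order cannot matter
        (acc.1 ++ [(g.1, digests.headD "")], acc.2)
      else (acc.1, acc.2 ++ [(g.1, signer_hashes.items)])) ([], [])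

-- ===== PRECONDITION & SPEC =====
def Spec_consensus_hashes (manifests : List (String × List (String × String))) (out : (List (String × String)) × (List (String × List (String × String)))) : Prop := out = consensus_hashes_alt manifests
instance (manifests : List (String × List (String × String))) (out : (List (String × String)) × (List (String × List (String × String)))) : Decidable (Spec_consensus_hashes manifests out) := by unfold Spec_consensus_hashes; infer_instance

-- ===== CLAIM (what is proved, stated in full; the proofs are below) =====
def Claim_equal_consensus_hashes : Prop := ∀ (manifests : List (String × List (String × String))), Dom_consensus_hashes manifests → Spec_consensus_hashes manifests (consensus_hashes manifests)


-- ===== LEMMAS AND PROOFS =====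

-- proof-side helpers: the encounter-order list of filenames and the per-file (signer, digest) list
def chInnerOrd (L : List String) (h : List (String × String)) : List String :=
  h.foldl (fun o fd => if fd.1 ∈ o then o else o ++ [fd.1]) L

def chOrd (L : List String) (ms : List (String × List (String × String))) : List String :=
  ms.foldl (fun o sh => chInnerOrd o sh.2) L

def chGatherOne (s : String) (h : List (String × String)) (f : String) : List (String × String) :=
  (h.filter (fun fd => fd.1 == f)).map (fun fd => (s, fd.2))

def chGather (ms : List (String × List (String × String))) (f : String) : List (String × String) :=
  ms.flatMap (fun sh => chGatherOne sh.1 sh.2 f)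

theorem mem_chInnerOrd (h : List (String × String)) (L : List String) (f : String) :
    f ∈ chInnerOrd L h ↔ f ∈ L ∨ f ∈ h.map Prod.fst := by
  induction h generalizing L with
  | nil => simp [chInnerOrd]
  | cons fd t ih =>
      simp only [chInnerOrd, List.foldl_cons] at *
      by_cases hm : fd.1 ∈ L
      · rw [if_pos hm, ih]
        simp only [List.map_cons, List.mem_cons]
        constructor
        · tauto
        · rintro (h1 | h2 | h3)
          · tauto
          · subst h2; tauto
          · tauto
      · rw [if_neg hm, ih]
        simp only [List.map_cons, List.mem_cons, List.mem_append, List.mem_singleton]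
        tauto

theorem nodup_chInnerOrd (h : List (String × String)) (L : List String) (hL : L.Nodup) :
    (chInnerOrd L h).Nodup := by
  induction h generalizing L with
  | nil => exact hL
  | cons fd t ih =>
      simp only [chInnerOrd, List.foldl_cons]
      by_cases hm : fd.1 ∈ L
      · rw [if_pos hm]; exact ih L hL
      · rw [if_neg hm]
        refine ih _ ?_
        simp [List.nodup_append, hL]
        intro a ha he
        exact hm (he ▸ ha)

theorem nodup_chOrd (ms : List (String × List (String × String))) (L : List String) (hL : L.Nodup) :
    (chOrd L ms).Nodup := by
  induction ms generalizing L with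
  | nil => exact hL
  | cons sh t ih => exact ih _ (nodup_chInnerOrd _ _ hL)

theorem chGatherOne_eq_nil (s : String) (h : List (String × String)) (f : String)
    (hf : f ∉ h.map Prod.fst) : chGatherOne s h f = [] := by
  unfold chGatherOne
  rw [List.filter_eq_nil_iff.mpr, List.map_nil]
  intro fd hfd
  simp only [beq_iff_eq]
  intro he
  exact hf (he ▸ List.mem_map_of_mem hfd)

-- one defaultdict update  by_file[filename][signer] = digest  on the characterised state
theorem chStep (s fn dg : String) (L : List String) (G : String → List (String × String))
    (hL : L.Nodup) (hGout : ∀ f, f ∉ L → G f = [])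
    (hfr : s ∉ (G fn).map Prod.fst) :
    (PySem.Dict.mk (L.map (fun f => (f, PySem.Dict.mk (G f))))).insert fn
        (((PySem.Dict.mk (L.map (fun f => (f, PySem.Dict.mk (G f))))).getD fn PySem.Dict.empty).insert s dg)
      = PySem.Dict.mk ((if fn ∈ L then L else L ++ [fn]).map
          (fun f => (f, PySem.Dict.mk (if f = fn then G fn ++ [(s, dg)] else G f)))) := by
  have hkeys : (PySem.Dict.mk (L.map (fun f => (f, PySem.Dict.mk (G f))))).keys = L := by
    simp [PySem.Dict.keys, PySem.Dict.items, Function.comp_def]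
  have hinner : ∀ l : List (String × String), s ∉ l.map Prod.fst →
      (PySem.Dict.mk l).insert s dg = PySem.Dict.mk (l ++ [(s, dg)]) := by
    intro l hs
    apply PySem.Dict.ext
    rw [PySem.Dict.items_insert_of_not_contains]
    rw [PySem.Dict.contains_eq_decide_mem_keys]
    simpa [PySem.Dict.keys, PySem.Dict.items, Function.comp_def] using hs
  by_cases hm : fn ∈ L
  · have hcont : (PySem.Dict.mk (L.map (fun f => (f, PySem.Dict.mk (G f))))).contains fn = true := by
      rw [PySem.Dict.contains_eq_decide_mem_keys, hkeys]; simp [hm]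
    have hget : (PySem.Dict.mk (L.map (fun f => (f, PySem.Dict.mk (G f))))).getD fn PySem.Dict.empty
        = PySem.Dict.mk (G fn) := by
      apply PySem.Dict.getD_of_mem_items
      · exact List.mem_map_of_mem hm
      · rw [hkeys]; exact hL
    rw [hget, hinner _ hfr, if_pos hm]
    apply PySem.Dict.ext
    rw [PySem.Dict.items_insert_of_contains _ _ hcont]
    show (L.map _).map _ = L.map _
    rw [List.map_map]
    apply List.map_congr_left
    intro f hfL
    by_cases he : f = fn
    · subst he; simp
    · simp [he, show (f == fn) = false by simp [he]]
  · have hcont : (PySem.Dict.mk (L.map (fun f => (f, PySem.Dict.mk (G f))))).contains fn = false := by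
      rw [PySem.Dict.contains_eq_decide_mem_keys, hkeys]; simp [hm]
    have hget : (PySem.Dict.mk (L.map (fun f => (f, PySem.Dict.mk (G f))))).getD fn PySem.Dict.empty
        = PySem.Dict.empty := PySem.Dict.getD_of_not_contains _ _ hcont
    rw [hget, if_neg hm]
    apply PySem.Dict.ext
    rw [PySem.Dict.items_insert_of_not_contains _ _ hcont]
    show L.map _ ++ [(fn, _)] = (L ++ [fn]).map _
    rw [List.map_append]
    congr 1
    · apply List.map_congr_left
      intro f hfL
      have : ¬ f = fn := fun he => hm (he ▸ hfL)
      simp [this]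
    · have : (PySem.Dict.empty : PySem.Dict String String).insert s dg
          = PySem.Dict.mk ([] ++ [(s, dg)]) := hinner [] (by simp)
      simp only [List.map_cons, List.map_nil]
      rw [this]
      simp [hGout fn hm]

-- A's inner loop (one signer's hashes) updates the by_file index exactly as intended
theorem chInner (s : String) (h : List (String × String)) (L : List String)
    (G : String → List (String × String))
    (hL : L.Nodup) (hGout : ∀ f, f ∉ L → G f = [])
    (hfr : ∀ fd ∈ h, s ∉ (G fd.1).map Prod.fst)
    (hnh : (h.map Prod.fst).Nodup) :
    h.foldl (fun bf fd => bf.insert fd.1 ((bf.getD fd.1 PySem.Dict.empty).insert s fd.2))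
        (PySem.Dict.mk (L.map (fun f => (f, PySem.Dict.mk (G f)))))
      = PySem.Dict.mk ((chInnerOrd L h).map (fun f => (f, PySem.Dict.mk (G f ++ chGatherOne s h f)))) := by
  induction h generalizing L G with
  | nil => simp [chInnerOrd, chGatherOne]
  | cons fd t ih =>
      rcases fd with ⟨fn, dg⟩
      simp only [List.map_cons, List.nodup_cons] at hnh
      obtain ⟨hfn_t, hnt⟩ := hnh
      simp only [List.foldl_cons]
      rw [chStep s fn dg L G hL hGout (hfr (fn, dg) (by simp))]
      rw [ih _ _ ?hLn ?hGn ?hfrn hnt]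
      case hLn =>
        by_cases hm : fn ∈ L
        · rw [if_pos hm]; exact hL
        · rw [if_neg hm]
          simp [List.nodup_append, hL]
          intro a ha he
          exact hm (he ▸ ha)
      case hGn =>
        intro f hf
        have hfn : fn ∈ (if fn ∈ L then L else L ++ [fn]) := by
          by_cases hm : fn ∈ L <;> simp [hm]
        have hne : ¬ f = fn := fun he => hf (he ▸ hfn)
        have hfL : f ∉ L := by
          intro hfL
          apply hf
          by_cases hm : fn ∈ L <;> simp [hm, hfL]
        simp [hne, hGout f hfL]
      case hfrn =>
        intro fd' hfd'
        have hne : ¬ fd'.1 = fn := fun he => hfn_t (he ▸ List.mem_map_of_mem hfd')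
        simp only [hne, if_false, ite_false]
        exact hfr fd' (List.mem_cons_of_mem _ hfd')
      · congr 1
        simp only [chInnerOrd, List.foldl_cons]
        apply List.map_congr_left
        intro f hfmem
        by_cases he : f = fn
        · subst he
          have hnil : t.filter (fun fd => fd.1 == f) = [] := by
            have h0 := chGatherOne_eq_nil s t f hfn_t
            unfold chGatherOne at h0
            exact List.map_eq_nil_iff.mp h0
          simp [chGatherOne, List.filter_cons, hnil]
        · have hbf : (fn == f) = false := by
            simp only [beq_eq_false_iff_ne, ne_eq]
            exact fun hh => he hh.symm
          simp [chGatherOne, List.filter_cons, hbf, he]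

-- A's whole index-building phase, characterised by chOrd and chGather
theorem chOuter (ms : List (String × List (String × String))) (L : List String)
    (G : String → List (String × String))
    (hL : L.Nodup) (hGout : ∀ f, f ∉ L → G f = [])
    (hfr : ∀ sh ∈ ms, ∀ f, sh.1 ∉ (G f).map Prod.fst)
    (hno : (ms.map Prod.fst).Nodup)
    (hni : ∀ sh ∈ ms, (sh.2.map Prod.fst).Nodup) :
    ms.foldl (fun bf sh =>
        sh.2.foldl (fun bf fd => bf.insert fd.1 ((bf.getD fd.1 PySem.Dict.empty).insert sh.1 fd.2)) bf)
        (PySem.Dict.mk (L.map (fun f => (f, PySem.Dict.mk (G f)))))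
      = PySem.Dict.mk ((chOrd L ms).map (fun f => (f, PySem.Dict.mk (G f ++ chGather ms f)))) := by
  induction ms generalizing L G with
  | nil => simp [chOrd, chGather]
  | cons sh t ih =>
      rcases sh with ⟨s, h⟩
      simp only [List.map_cons, List.nodup_cons] at hno
      obtain ⟨hs_t, hnot⟩ := hno
      simp only [List.foldl_cons]
      rw [chInner s h L G hL hGout (fun fd _ => hfr (s, h) (by simp) fd.1) (hni (s, h) (by simp))]
      rw [ih _ _ (nodup_chInnerOrd h L hL) ?hGn ?hfrn hnot
            (fun sh' hsh' => hni sh' (List.mem_cons_of_mem _ hsh'))]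
      case hGn =>
        intro f hf
        rw [mem_chInnerOrd] at hf
        push_neg at hf
        rw [hGout f hf.1, chGatherOne_eq_nil s h f hf.2]
        rfl
      case hfrn =>
        intro sh' hsh' f
        simp only [List.map_append, List.mem_append]
        rintro (hin | hin)
        · exact hfr sh' (List.mem_cons_of_mem _ hsh') f hin
        · unfold chGatherOne at hin
          rw [List.map_map] at hin
          obtain ⟨fd, hfd, hfd'⟩ := List.mem_map.mp hin
          simp only [Function.comp] at hfd'
          exact hs_t (hfd' ▸ List.mem_map_of_mem hsh')
      · congr 1
        simp only [chOrd, List.foldl_cons]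
        apply List.map_congr_left
        intro f _
        simp [chGather, List.append_assoc]

-- first-match lookup in a duplicate-free association list, as chGatherOne
theorem chGatherOne_eq_get (s : String) (h : List (String × String)) (f : String)
    (hnh : (h.map Prod.fst).Nodup) :
    chGatherOne s h f = ((PySem.Dict.mk h).get? f).elim [] (fun dg => [(s, dg)]) := by
  induction h with
  | nil => simp [chGatherOne, PySem.Dict.get?]
  | cons fd t ih =>
      rcases fd with ⟨fn, dg⟩
      simp only [List.map_cons, List.nodup_cons] at hnh
      rw [PySem.Dict.get?_mk_cons]
      by_cases he : fn = f
      · subst he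
        simp only [beq_self_eq_true, if_true, Option.elim_some]
        unfold chGatherOne
        simp only [List.filter_cons, beq_self_eq_true, if_true, List.map_cons]
        rw [List.filter_eq_nil_iff.mpr, List.map_nil]
        intro fd' hfd'
        simp only [beq_iff_eq]
        intro hc
        exact hnh.1 (hc ▸ List.mem_map_of_mem hfd')
      · have : (fn == f) = false := by simp [he]
        rw [this]
        simp only [if_false, Bool.false_eq_true]
        rw [← ih hnh.2]
        unfold chGatherOne
        simp [List.filter_cons, this]

-- the shared final loop: fresh-key dict insertions are list appends
theorem chFinal (names : List String) (val : String → PySem.Dict String String)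
    (d1 : PySem.Dict String String) (d2 : PySem.Dict String (PySem.Dict String String))
    (hn : names.Nodup)
    (h1 : ∀ f ∈ names, d1.contains f = false)
    (h2 : ∀ f ∈ names, d2.contains f = false) :
    (let ra := (names.map (fun f => (f, val f))).foldl
        (fun acc p =>
          let unique := PySem.Set.ofList p.2.values
          if PySem.Set.len unique == 1 then (acc.1.insert p.1 (unique.headD ""), acc.2)
          else (acc.1, acc.2.insert p.1 p.2)) (d1, d2)
     (ra.1.items, ra.2.items.map (fun p => (p.1, p.2.items))))
      = names.foldl (fun acc f =>
          let digests := PySem.Set.ofList (val f).values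
          if PySem.Set.len digests == 1 then (acc.1 ++ [(f, digests.headD "")], acc.2)
          else (acc.1, acc.2 ++ [(f, (val f).items)]))
          (d1.items, d2.items.map (fun p => (p.1, p.2.items))) := by
  induction names generalizing d1 d2 with
  | nil => simp
  | cons f t ih =>
      obtain ⟨hf_t, hnt⟩ := List.nodup_cons.mp hn
      have h1f : d1.contains f = false := h1 f (by simp)
      have h2f : d2.contains f = false := h2 f (by simp)
      simp only [List.map_cons, List.foldl_cons]
      by_cases hc : (PySem.Set.len (PySem.Set.ofList (val f).values) == 1) = true
      · rw [if_pos hc, if_pos hc]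
        rw [ih (d1.insert f ((PySem.Set.ofList (val f).values).headD "")) d2 hnt ?h1' ?h2']
        case h1' =>
          intro g hg
          rw [PySem.Dict.contains_insert]
          have hne : (g == f) = false := by
            simp only [beq_eq_false_iff_ne, ne_eq]
            exact fun he => hf_t (he ▸ hg)
          simp [hne, h1 g (List.mem_cons_of_mem _ hg)]
        case h2' => exact fun g hg => h2 g (List.mem_cons_of_mem _ hg)
        rw [PySem.Dict.items_insert_of_not_contains _ _ h1f]
      · rw [if_neg hc, if_neg hc]
        rw [ih d1 (d2.insert f (val f)) hnt ?h1'' ?h2'']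
        case h1'' => exact fun g hg => h1 g (List.mem_cons_of_mem _ hg)
        case h2'' =>
          intro g hg
          rw [PySem.Dict.contains_insert]
          have hne : (g == f) = false := by
            simp only [beq_eq_false_iff_ne, ne_eq]
            exact fun he => hf_t (he ▸ hg)
          simp [hne, h2 g (List.mem_cons_of_mem _ hg)]
        rw [PySem.Dict.items_insert_of_not_contains _ _ h2f]
        rw [List.map_append]
        simp

-- both ports iterate the normalised manifests: dict-of-dict entries, duplicates collapsed
def chNorm (manifests : List (String × List (String × String))) : List (String × List (String × String)) :=
  (PySem.Dict.ofList manifests).items.map (fun sh => (sh.1, (PySem.Dict.ofList sh.2).items))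

theorem chNorm_nodup_outer (manifests : List (String × List (String × String))) :
    ((chNorm manifests).map Prod.fst).Nodup := by
  unfold chNorm
  rw [List.map_map]
  have := PySem.Dict.nodup_keys_ofList manifests
  simpa [PySem.Dict.keys, Function.comp_def] using this

theorem chNorm_nodup_inner (manifests : List (String × List (String × String))) :
    ∀ sh ∈ chNorm manifests, (sh.2.map Prod.fst).Nodup := by
  intro sh hsh
  unfold chNorm at hsh
  obtain ⟨sh0, _, rfl⟩ := List.mem_map.mp hsh
  have := PySem.Dict.nodup_keys_ofList sh0.2
  simpa [PySem.Dict.keys] using this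

-- A's index-building phase, in terms of chOrd and chGather
theorem chA (manifests : List (String × List (String × String))) :
    (PySem.Dict.ofList manifests).items.foldl (fun bf sh =>
        (PySem.Dict.ofList sh.2).items.foldl (fun bf fd =>
          bf.insert fd.1 ((bf.getD fd.1 PySem.Dict.empty).insert sh.1 fd.2)) bf)
      PySem.Dict.empty
    = PySem.Dict.mk ((chOrd [] (chNorm manifests)).map
        (fun f => (f, PySem.Dict.mk (chGather (chNorm manifests) f)))) := by
  have h0 := chOuter (chNorm manifests) [] (fun _ => []) (by simp) (by simp) (by simp)
      (chNorm_nodup_outer manifests) (chNorm_nodup_inner manifests)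
  simp only [List.map_nil, List.nil_append] at h0
  rw [← h0]
  unfold chNorm
  rw [List.foldl_map]
  rfl

-- sorted(by_file.items()) is the sorted filename list paired with its gathers
theorem chSorted (ms' : List (String × List (String × String))) :
    PySem.List.sorted (PySem.Dict.mk ((chOrd [] ms').map
        (fun f => (f, PySem.Dict.mk (chGather ms' f))))).items (fun p => p.1) false
    = (PySem.List.sorted (chOrd [] ms') (fun x => x) false).map
        (fun f => (f, PySem.Dict.mk (chGather ms' f))) := by
  apply PySem.List.sorted_eq_of_perm_of_pairwise_lt
  · exact (PySem.List.sorted_perm (chOrd [] ms') (fun x => x) false).map _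
  · rw [List.pairwise_map]
    have hp := PySem.List.sorted_pairwise (chOrd [] ms') (fun x => x)
    have hnd : (PySem.List.sorted (chOrd [] ms') (fun x => x) false).Nodup :=
      ((PySem.List.sorted_perm (chOrd [] ms') (fun x => x) false).nodup_iff).mpr
        (nodup_chOrd ms' [] (by simp))
    exact (hp.and hnd).imp fun h => lt_of_le_of_ne h.1 h.2

-- ── B-side machinery: triples, runs of equal filename, sorted insertion ──

def chTriples (ms : List (String × List (String × String))) : List (String × String × String) :=
  ms.flatMap (fun sh => sh.2.map (fun fd => (fd.1, sh.1, fd.2)))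

def chFlat (GS : List (String × List (String × String))) : List (String × String × String) :=
  GS.flatMap (fun g => g.2.map (fun p => (g.1, p.1, p.2)))

def chSIns (f : String) : List String → List String
  | [] => [f]
  | k :: K => if f < k then f :: k :: K else k :: chSIns f K

def chGIns (f : String) (sd : String × String) :
    List (String × List (String × String)) → List (String × List (String × String))
  | [] => [(f, [sd])]
  | g :: rest =>
      if f < g.1 then (f, [sd]) :: g :: rest
      else if f = g.1 then (g.1, g.2 ++ [sd]) :: rest
      else g :: chGIns f sd rest

def chTOrd (K : List String) (ts : List (String × String × String)) : List String :=
  ts.foldl (fun K x => if x.1 ∈ K then K else chSIns x.1 K) K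

def chTGather (ts : List (String × String × String)) (k : String) : List (String × String) :=
  (ts.filter (fun x => x.1 == k)).map (fun x => (x.2.1, x.2.2))

theorem chSIns_cons (f k : String) (K : List String) :
    chSIns f (k :: K) = if f < k then f :: k :: K else k :: chSIns f K := rfl

theorem mem_chSIns (f x : String) (K : List String) :
    x ∈ chSIns f K ↔ x = f ∨ x ∈ K := by
  induction K with
  | nil => simp [chSIns]
  | cons k K ih =>
      unfold chSIns
      by_cases hlt : f < k
      · simp [hlt]
      · simp [hlt, ih]
        tauto

theorem chSIns_pairwise (f : String) (K : List String)
    (hK : K.Pairwise (· < ·)) (hf : f ∉ K) : (chSIns f K).Pairwise (· < ·) := by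
  induction K with
  | nil => simp [chSIns]
  | cons k K ih =>
      obtain ⟨hk, hK'⟩ := List.pairwise_cons.mp hK
      unfold chSIns
      by_cases hlt : f < k
      · rw [if_pos hlt]
        refine List.pairwise_cons.mpr ⟨?_, hK⟩
        intro a ha
        rcases List.mem_cons.mp ha with rfl | ha
        · exact hlt
        · exact lt_trans hlt (hk a ha)
      · have hne : f ≠ k := fun he => hf (he ▸ List.mem_cons_self)
        have hgt : k < f := lt_of_le_of_ne (not_lt.mp hlt) (Ne.symm hne)
        rw [if_neg hlt]
        refine List.pairwise_cons.mpr ⟨?_, ih hK' (fun hm => hf (List.mem_cons_of_mem _ hm))⟩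
        intro a ha
        rcases (mem_chSIns f a K).mp ha with rfl | ha
        · exact hgt
        · exact hk a ha

theorem chGIns_map (f : String) (sd : String × String) (K : List String)
    (G : String → List (String × String))
    (hK : K.Pairwise (· < ·)) (hGout : f ∉ K → G f = []) :
    chGIns f sd (K.map (fun k => (k, G k)))
      = (if f ∈ K then K else chSIns f K).map
          (fun k => (k, if k = f then G k ++ [sd] else G k)) := by
  induction K with
  | nil =>
      simp [chGIns, chSIns, hGout (by simp)]
  | cons k K ih =>
      obtain ⟨hk, hK'⟩ := List.pairwise_cons.mp hK
      simp only [List.map_cons]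
      unfold chGIns
      rcases lt_trichotomy f k with hlt | heq | hgt
      · have hnm : f ∉ k :: K := by
          intro hm
          rcases List.mem_cons.mp hm with rfl | hm
          · exact lt_irrefl _ hlt
          · exact lt_irrefl _ (lt_trans hlt (hk f hm))
        rw [if_pos hlt, if_neg hnm]
        unfold chSIns
        rw [if_pos hlt]
        simp only [List.map_cons]
        rw [hGout hnm]
        have hkf : ¬ k = f := fun he => (he ▸ hnm) List.mem_cons_self
        simp only [if_pos rfl, if_neg hkf, List.nil_append]
        congr 1
        congr 1
        apply List.map_congr_left
        intro a ha
        have : ¬ a = f := by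
          intro he; subst he
          exact hnm (List.mem_cons_of_mem _ ha)
        simp [this]
      · subst heq
        have hnm : f ∉ K := fun hm => lt_irrefl _ (hk f hm)
        rw [if_neg (lt_irrefl f), if_pos rfl, if_pos List.mem_cons_self]
        simp only [List.map_cons, if_pos rfl]
        congr 1
        apply List.map_congr_left
        intro a ha
        have : ¬ a = f := fun he => hnm (he ▸ ha)
        simp [this]
      · have hnlt : ¬ f < k := not_lt.mpr (le_of_lt hgt)
        have hnef : ¬ f = k := fun he => lt_irrefl _ (he ▸ hgt)
        rw [if_neg hnlt, if_neg hnef]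
        have hmem : f ∈ k :: K ↔ f ∈ K := by
          constructor
          · intro hm; rcases List.mem_cons.mp hm with rfl | hm
            · exact absurd hgt (lt_irrefl _)
            · exact hm
          · exact List.mem_cons_of_mem _
        rw [ih hK' (fun hm => hGout (fun hm2 => hm (hmem.mp hm2)))]
        by_cases hmK : f ∈ K
        · rw [if_pos hmK, if_pos (hmem.mpr hmK)]
          simp only [List.map_cons, if_neg (Ne.symm (ne_of_gt hgt) : ¬ k = f)]
        · rw [if_neg hmK, if_neg (fun h => hmK (hmem.mp h))]
          rw [show chSIns f (k :: K) = k :: chSIns f K by rw [chSIns_cons, if_neg hnlt]]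
          simp only [List.map_cons, if_neg (Ne.symm (ne_of_gt hgt) : ¬ k = f)]

theorem chInsertBy_cons (x y : String × String × String) (l : List (String × String × String)) :
    PySem.List.insertBy (fun a b => decide (a.1 < b.1)) x (y :: l)
      = if x.1 < y.1 then x :: y :: l
        else y :: PySem.List.insertBy (fun a b => decide (a.1 < b.1)) x l := by
  show (if decide (x.1 < y.1) = true then _ else _) = _
  split_ifs with h1 <;> simp_all

theorem chInsertBy_skip (x : String × String × String) (l1 l2 : List (String × String × String))
    (h : ∀ y ∈ l1, ¬ x.1 < y.1) :
    PySem.List.insertBy (fun a b => decide (a.1 < b.1)) x (l1 ++ l2)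
      = l1 ++ PySem.List.insertBy (fun a b => decide (a.1 < b.1)) x l2 := by
  induction l1 with
  | nil => simp
  | cons y l1 ih =>
      have hy : ¬ x.1 < y.1 := h y List.mem_cons_self
      simp only [List.cons_append]
      simp only [PySem.List.insertBy]
      rw [if_neg (by simpa using hy)]
      rw [ih (fun z hz => h z (List.mem_cons_of_mem _ hz))]

-- one stable insertion lands at the end of its filename's run
theorem chInsertBy_flat (f s d : String) (GS : List (String × List (String × String)))
    (hK : (GS.map Prod.fst).Pairwise (· < ·)) (hne : ∀ g ∈ GS, g.2 ≠ []) :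
    PySem.List.insertBy (fun a b => decide (a.1 < b.1)) (f, s, d) (chFlat GS)
      = chFlat (chGIns f (s, d) GS) := by
  induction GS with
  | nil => simp [chFlat, chGIns, PySem.List.insertBy]
  | cons g rest ih =>
      simp only [List.map_cons] at hK
      obtain ⟨hkg, hK'⟩ := List.pairwise_cons.mp hK
      have hgne : g.2 ≠ [] := hne g List.mem_cons_self
      obtain ⟨p, g', hg⟩ := List.exists_cons_of_ne_nil hgne
      unfold chGIns
      rcases lt_trichotomy f g.1 with hlt | heq | hgt
      · rw [if_pos hlt]
        rw [show chFlat (g :: rest) = g.2.map (fun p => (g.1, p.1, p.2)) ++ chFlat rest from rfl]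
        rw [hg, List.map_cons, List.cons_append, chInsertBy_cons, if_pos hlt]
        simp [chFlat, List.flatMap_cons, hg]
      · have hnlt : ¬ f < g.1 := by rw [heq]; exact lt_irrefl _
        rw [if_neg hnlt, if_pos heq]
        rw [show chFlat (g :: rest) = g.2.map (fun p => (g.1, p.1, p.2)) ++ chFlat rest from rfl]
        rw [chInsertBy_skip _ _ _ (by
          intro y hy
          obtain ⟨q, _, rfl⟩ := List.mem_map.mp hy
          exact hnlt)]
        have hpre : PySem.List.insertBy (fun a b => decide (a.1 < b.1)) (f, s, d) (chFlat rest)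
            = (f, s, d) :: chFlat rest := by
          cases hrest : rest with
          | nil => simp [chFlat, PySem.List.insertBy]
          | cons g2 r2 =>
              have hg2ne : g2.2 ≠ [] := hne g2 (by rw [hrest]; exact List.mem_cons_of_mem _ List.mem_cons_self)
              obtain ⟨q, g2', hg2⟩ := List.exists_cons_of_ne_nil hg2ne
              have hlt2 : f < g2.1 := heq ▸ hkg g2.1 (by rw [hrest]; simp)
              rw [show chFlat (g2 :: r2) = g2.2.map (fun p => (g2.1, p.1, p.2)) ++ chFlat r2 from rfl]
              rw [hg2, List.map_cons, List.cons_append, chInsertBy_cons, if_pos hlt2]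
        rw [hpre]
        rw [show chFlat ((g.1, g.2 ++ [(s, d)]) :: rest)
            = (g.2 ++ [(s, d)]).map (fun p => (g.1, p.1, p.2)) ++ chFlat rest from rfl]
        rw [List.map_append, heq]
        simp
      · have hnlt : ¬ f < g.1 := not_lt.mpr (le_of_lt hgt)
        have hnef : ¬ f = g.1 := fun he => lt_irrefl _ (he ▸ hgt)
        rw [if_neg hnlt, if_neg hnef]
        rw [show chFlat (g :: rest) = g.2.map (fun p => (g.1, p.1, p.2)) ++ chFlat rest from rfl]
        rw [chInsertBy_skip _ _ _ (by
          intro y hy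
          obtain ⟨q, _, rfl⟩ := List.mem_map.mp hy
          exact hnlt)]
        rw [ih hK' (fun g2 hg2 => hne g2 (List.mem_cons_of_mem _ hg2))]
        simp [chFlat, List.flatMap_cons]

-- the whole insertion sort of the triples, characterised by chTOrd and chTGather
theorem chSortFold (ts : List (String × String × String)) (K : List String)
    (G : String → List (String × String))
    (hK : K.Pairwise (· < ·)) (hGout : ∀ f, f ∉ K → G f = [])
    (hne : ∀ k ∈ K, G k ≠ []) :
    ts.foldl (fun acc x => PySem.List.insertBy (fun a b => decide (a.1 < b.1)) x acc)
        (chFlat (K.map (fun k => (k, G k))))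
      = chFlat ((chTOrd K ts).map (fun k => (k, G k ++ chTGather ts k))) := by
  induction ts generalizing K G with
  | nil =>
      simp only [List.foldl_nil, chTOrd, chTGather, List.filter_nil, List.map_nil]
      congr 1
      apply List.map_congr_left
      intro k _
      simp
  | cons x ts ih =>
      obtain ⟨f, s, d⟩ := x
      simp only [List.foldl_cons]
      rw [chInsertBy_flat f s d _
          (by simpa [List.map_map, Function.comp_def] using hK)
          (by
            intro g hgm
            obtain ⟨k, hk, rfl⟩ := List.mem_map.mp hgm
            exact hne k hk)]
      rw [chGIns_map f (s, d) K G hK (hGout f)]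
      have hKmem : f ∈ (if f ∈ K then K else chSIns f K) := by
        by_cases hm : f ∈ K
        · rw [if_pos hm]; exact hm
        · rw [if_neg hm]; exact (mem_chSIns f f K).mpr (Or.inl rfl)
      have hsub : ∀ k, k ∈ K → k ∈ (if f ∈ K then K else chSIns f K) := by
        intro k hk
        by_cases hm : f ∈ K
        · rw [if_pos hm]; exact hk
        · rw [if_neg hm]; exact (mem_chSIns f k K).mpr (Or.inr hk)
      rw [ih _ _
          (by
            by_cases hm : f ∈ K
            · rw [if_pos hm]; exact hK
            · rw [if_neg hm]; exact chSIns_pairwise f K hK hm)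
          (by
            intro k hk
            have hkf : ¬ k = f := fun he => hk (he ▸ hKmem)
            have hkK : k ∉ K := fun hm => hk (hsub k hm)
            simp [hkf, hGout k hkK])
          (by
            intro k hk
            by_cases hkf : k = f
            · subst hkf; simp
            · rw [if_neg hkf]
              refine hne k ?_
              by_cases hm : f ∈ K
              · rwa [if_pos hm] at hk
              · rw [if_neg hm] at hk
                rcases (mem_chSIns f k K).mp hk with rfl | hk
                · exact absurd rfl hkf
                · exact hk)]
      rw [show chTOrd K ((f, s, d) :: ts) = chTOrd (if f ∈ K then K else chSIns f K) ts from rfl]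
      congr 1
      apply List.map_congr_left
      intro k _
      by_cases hkf : k = f
      · subst hkf
        simp [chTGather, List.filter_cons]
      · have hbf : (f == k) = false := by
          simp only [beq_eq_false_iff_ne, ne_eq]
          exact fun he => hkf he.symm
        simp [hkf, chTGather, List.filter_cons, hbf]

theorem mem_chTOrd (x : String) (K : List String) (ts : List (String × String × String)) :
    x ∈ chTOrd K ts ↔ x ∈ K ∨ x ∈ ts.map Prod.fst := by
  induction ts generalizing K with
  | nil => simp [chTOrd]
  | cons t ts ih =>
      simp only [chTOrd, List.foldl_cons] at *
      by_cases hm : t.1 ∈ K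
      · rw [if_pos hm, ih]
        simp only [List.map_cons, List.mem_cons]
        constructor
        · tauto
        · rintro (h1 | h2 | h3)
          · tauto
          · subst h2; tauto
          · tauto
      · rw [if_neg hm, ih]
        simp only [List.map_cons, List.mem_cons, mem_chSIns]
        tauto

theorem chTOrd_pairwise (K : List String) (ts : List (String × String × String))
    (hK : K.Pairwise (· < ·)) : (chTOrd K ts).Pairwise (· < ·) := by
  induction ts generalizing K with
  | nil => exact hK
  | cons t ts ih =>
      simp only [chTOrd, List.foldl_cons]
      by_cases hm : t.1 ∈ K
      · rw [if_pos hm]; exact ih K hK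
      · rw [if_neg hm]; exact ih _ (chSIns_pairwise t.1 K hK hm)

theorem chTGather_chTriples (ms : List (String × List (String × String))) (k : String) :
    chTGather (chTriples ms) k = chGather ms k := by
  induction ms with
  | nil => simp [chTGather, chTriples, chGather]
  | cons sh ms ih =>
      simp only [chTriples, List.flatMap_cons] at *
      unfold chTGather at *
      rw [List.filter_append, List.map_append, ih]
      unfold chGather
      rw [List.flatMap_cons]
      congr 1
      unfold chGatherOne
      rw [List.filter_map, List.map_map]
      apply List.map_congr_left
      intro fd _
      rfl

theorem mem_chOrd (x : String) (L : List String) (ms : List (String × List (String × String))) :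
    x ∈ chOrd L ms ↔ x ∈ L ∨ x ∈ (chTriples ms).map Prod.fst := by
  induction ms generalizing L with
  | nil => simp [chOrd, chTriples]
  | cons sh ms ih =>
      simp only [chOrd, chTriples, List.foldl_cons, List.flatMap_cons, List.map_append] at *
      rw [ih]
      rw [mem_chInnerOrd]
      simp only [List.mem_append, List.map_map]
      constructor
      · rintro ((h1 | h2) | h3)
        · tauto
        · refine Or.inr (Or.inl ?_)
          obtain ⟨fd, hfd, rfl⟩ := List.mem_map.mp h2
          exact List.mem_map.mpr ⟨fd, hfd, rfl⟩
        · tauto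
      · rintro (h1 | h2 | h3)
        · tauto
        · refine Or.inl (Or.inr ?_)
          obtain ⟨fd, hfd, rfl⟩ := List.mem_map.mp h2
          exact List.mem_map.mpr ⟨fd, hfd, rfl⟩
        · tauto

-- the strictly increasing filename list produced by the insertion sort IS sorted(order)
theorem chTOrd_eq_sorted (ms : List (String × List (String × String))) :
    PySem.List.sorted (chOrd [] ms) (fun x => x) false = chTOrd [] (chTriples ms) := by
  apply PySem.List.sorted_eq_of_perm_of_pairwise_lt
  · rw [List.perm_ext_iff_of_nodup
        ((chTOrd_pairwise [] (chTriples ms) (by simp)).imp ne_of_lt)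
        (nodup_chOrd ms [] (by simp))]
    intro a
    rw [mem_chTOrd, mem_chOrd]
  · exact chTOrd_pairwise [] (chTriples ms) (by simp)

-- one run of equal filenames appends, pair by pair, to the open group
theorem chRunsRun (k : String) (qs : List (String × String)) :
    ∀ (pref : List (String × List (String × String))) (ps0 : List (String × String)),
    (qs.map (fun p => (k, p.1, p.2))).foldl (fun gs t =>
        match gs.getLast? with
        | some last =>
            if last.1 == t.1 then gs.dropLast ++ [(last.1, last.2 ++ [(t.2.1, t.2.2)])]
            else gs ++ [(t.1, [(t.2.1, t.2.2)])]
        | none => [(t.1, [(t.2.1, t.2.2)])]) (pref ++ [(k, ps0)])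
      = pref ++ [(k, ps0 ++ qs)] := by
  induction qs with
  | nil => intro pref ps0; simp
  | cons q qs ih =>
      intro pref ps0
      simp only [List.map_cons, List.foldl_cons, List.getLast?_concat]
      have hc : (((k, ps0) : String × List (String × String)).1 == ((k, q.1, q.2) : String × String × String).1) = true := by simp
      rw [hc, if_pos rfl, List.dropLast_concat, ih pref (ps0 ++ [(q.1, q.2)])]
      simp

-- B's run-splitting loop undoes chFlat
theorem chRuns (GS : List (String × List (String × String)))
    (acc : List (String × List (String × String)))
    (hK : ((acc ++ GS).map Prod.fst).Pairwise (· < ·))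
    (hne : ∀ g ∈ GS, g.2 ≠ []) :
    (chFlat GS).foldl (fun gs t =>
        match gs.getLast? with
        | some last =>
            if last.1 == t.1 then gs.dropLast ++ [(last.1, last.2 ++ [(t.2.1, t.2.2)])]
            else gs ++ [(t.1, [(t.2.1, t.2.2)])]
        | none => [(t.1, [(t.2.1, t.2.2)])]) acc
      = acc ++ GS := by
  induction GS generalizing acc with
  | nil => simp [chFlat]
  | cons g rest ih =>
      obtain ⟨k, ps⟩ := g
      have hpsne : ps ≠ [] := by simpa using hne (k, ps) List.mem_cons_self
      obtain ⟨p, ps', hps⟩ := List.exists_cons_of_ne_nil hpsne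
      subst hps
      rw [show chFlat ((k, p :: ps') :: rest)
          = (k, p.1, p.2) :: (ps'.map (fun p => (k, p.1, p.2)) ++ chFlat rest) from by
        simp [chFlat, List.flatMap_cons]]
      rw [List.foldl_cons]
      have hfirst : (match acc.getLast? with
          | some last =>
              if last.1 == (k, p.1, p.2).1 then
                acc.dropLast ++ [(last.1, last.2 ++ [((k, p.1, p.2).2.1, (k, p.1, p.2).2.2)])]
              else acc ++ [((k, p.1, p.2).1, [((k, p.1, p.2).2.1, (k, p.1, p.2).2.2)])]
          | none => [((k, p.1, p.2).1, [((k, p.1, p.2).2.1, (k, p.1, p.2).2.2)])])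
          = acc ++ [(k, [(p.1, p.2)])] := by
        rcases List.eq_nil_or_concat acc with rfl | ⟨a2, last, rfl⟩
        · simp
        · simp only [List.concat_eq_append] at *
          have hml : last ∈ a2 ++ [last] := by simp
          have hlk : last.1 < k := by
            rw [List.map_append, List.pairwise_append] at hK
            exact hK.2.2 last.1 (List.mem_map_of_mem hml) k (by simp)
          have hbf : (last.1 == k) = false := by
            simp only [beq_eq_false_iff_ne, ne_eq]
            exact fun he => lt_irrefl _ (he ▸ hlk)
          simp only [List.getLast?_concat]
          rw [hbf]
          simp
      rw [hfirst, List.foldl_append, chRunsRun k ps' acc [(p.1, p.2)]]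
      have hacc' : acc ++ [(k, [(p.1, p.2)] ++ ps')] = acc ++ [(k, p :: ps')] := by simp
      rw [hacc']
      rw [ih (acc ++ [(k, p :: ps')])
          (by
            have := hK
            rw [show acc ++ (k, p :: ps') :: rest = (acc ++ [(k, p :: ps')]) ++ rest from by simp] at this
            exact this)
          (fun g hg => hne g (List.mem_cons_of_mem _ hg))]
      simp

theorem chGather_map_fst_sublist (ms : List (String × List (String × String))) (f : String)
    (hni : ∀ sh ∈ ms, (sh.2.map Prod.fst).Nodup) :
    ((chGather ms f).map Prod.fst).Sublist (ms.map Prod.fst) := by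
  induction ms with
  | nil => simp [chGather]
  | cons sh ms ih =>
      have hih := ih (fun sh' h => hni sh' (List.mem_cons_of_mem _ h))
      unfold chGather at *
      rw [List.flatMap_cons, List.map_append, List.map_cons]
      rw [chGatherOne_eq_get sh.1 sh.2 f (hni sh List.mem_cons_self)]
      cases (PySem.Dict.mk sh.2).get? f with
      | none => exact List.Sublist.cons _ hih
      | some dg => exact List.Sublist.cons₂ _ hih

theorem chOfList_eq_mk (l : List (String × String)) (h : (l.map Prod.fst).Nodup) :
    PySem.Dict.ofList l = PySem.Dict.mk l := by
  apply PySem.Dict.ext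
  rw [show PySem.Dict.ofList l = l.foldl (fun d p => d.insert p.1 p.2) PySem.Dict.empty from rfl]
  rw [PySem.Dict.items_foldl_insert_fresh l (fun p => p.1) (fun p => p.2) PySem.Dict.empty
      (fun a _ => rfl) (by simpa using h)]
  simp [PySem.Dict.empty]

theorem chGather_ne_nil (ms : List (String × List (String × String))) (f : String)
    (hf : f ∈ (chTriples ms).map Prod.fst) : chGather ms f ≠ [] := by
  obtain ⟨t, ht, rfl⟩ := List.mem_map.mp hf
  obtain ⟨sh, hsh, ht2⟩ := List.mem_flatMap.mp ht
  obtain ⟨fd, hfd, rfl⟩ := List.mem_map.mp ht2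
  apply List.ne_nil_of_mem (a := (sh.1, fd.2))
  unfold chGather
  refine List.mem_flatMap.mpr ⟨sh, hsh, ?_⟩
  unfold chGatherOne
  refine List.mem_map.mpr ⟨fd, List.mem_filter.mpr ⟨hfd, by simp⟩, rfl⟩

-- ===== VERDICT (by name: the statement is the Claim_ definition above) =====
theorem consensus_hashes_spec : Claim_equal_consensus_hashes := by
  intro manifests _
  show consensus_hashes manifests = consensus_hashes_alt manifests
  have hNeq : PySem.List.sorted (chOrd [] (chNorm manifests)) (fun x => x) false
      = chTOrd [] (chTriples (chNorm manifests)) := chTOrd_eq_sorted (chNorm manifests)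
  have hNlt : (PySem.List.sorted (chOrd [] (chNorm manifests)) (fun x => x) false).Pairwise (· < ·) := by
    rw [hNeq]; exact chTOrd_pairwise [] _ (by simp)
  have hA : consensus_hashes manifests =
      (let res := (PySem.List.sorted (PySem.Dict.mk ((chOrd [] (chNorm manifests)).map
            (fun f => (f, PySem.Dict.mk (chGather (chNorm manifests) f))))).items (fun p => p.1) false).foldl
          (fun acc p =>
            let unique := PySem.Set.ofList p.2.values
            if PySem.Set.len unique == 1 then (acc.1.insert p.1 (unique.headD ""), acc.2)
            else (acc.1, acc.2.insert p.1 p.2))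
          ((PySem.Dict.empty : PySem.Dict String String),
           (PySem.Dict.empty : PySem.Dict String (PySem.Dict String String)))
       (res.1.items, res.2.items.map (fun p => (p.1, p.2.items)))) := by
    unfold consensus_hashes
    rw [chA manifests]
  have hTrip : (PySem.Dict.ofList manifests).items.flatMap (fun sh =>
        (PySem.Dict.ofList sh.2).items.map (fun fd => (fd.1, sh.1, fd.2)))
      = chTriples (chNorm manifests) := by
    unfold chTriples chNorm
    rw [List.flatMap_map]
  have hSort : PySem.List.sorted (chTriples (chNorm manifests)) (fun t => t.1) false
      = chFlat ((PySem.List.sorted (chOrd [] (chNorm manifests)) (fun x => x) false).map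
          (fun k => (k, chGather (chNorm manifests) k))) := by
    rw [PySem.List.sorted_eq_foldl_insertBy]
    have h0 := chSortFold (chTriples (chNorm manifests)) [] (fun _ => [])
        (by simp) (by simp) (by simp)
    simp only [List.map_nil] at h0
    rw [show chFlat [] = [] from rfl] at h0
    rw [h0, hNeq]
    congr 1
    apply List.map_congr_left
    intro k _
    rw [chTGather_chTriples]
    simp
  have hGroups : (chFlat ((PySem.List.sorted (chOrd [] (chNorm manifests)) (fun x => x) false).map
          (fun k => (k, chGather (chNorm manifests) k)))).foldl (fun gs t =>
        match gs.getLast? with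
        | some last =>
            if last.1 == t.1 then gs.dropLast ++ [(last.1, last.2 ++ [(t.2.1, t.2.2)])]
            else gs ++ [(t.1, [(t.2.1, t.2.2)])]
        | none => [(t.1, [(t.2.1, t.2.2)])]) []
      = (PySem.List.sorted (chOrd [] (chNorm manifests)) (fun x => x) false).map
          (fun k => (k, chGather (chNorm manifests) k)) := by
    have h0 := chRuns ((PySem.List.sorted (chOrd [] (chNorm manifests)) (fun x => x) false).map
          (fun k => (k, chGather (chNorm manifests) k))) []
        (by simpa [List.map_map, Function.comp_def] using hNlt)
        (by
          intro g hg
          obtain ⟨k, hk, rfl⟩ := List.mem_map.mp hg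
          have hkm : k ∈ chOrd [] (chNorm manifests) :=
            (PySem.List.mem_sorted _ _ _ _).mp hk
          have := (mem_chOrd k [] (chNorm manifests)).mp hkm
          simp only [List.not_mem_nil, false_or] at this
          exact chGather_ne_nil (chNorm manifests) k this)
    simpa using h0
  have hB : consensus_hashes_alt manifests =
      ((PySem.List.sorted (chTriples (chNorm manifests)) (fun t => t.1) false).foldl (fun gs t =>
          match gs.getLast? with
          | some last =>
              if last.1 == t.1 then gs.dropLast ++ [(last.1, last.2 ++ [(t.2.1, t.2.2)])]
              else gs ++ [(t.1, [(t.2.1, t.2.2)])]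
          | none => [(t.1, [(t.2.1, t.2.2)])]) []).foldl (fun acc g =>
        let signer_hashes := PySem.Dict.ofList g.2
        let digests := PySem.Set.ofList signer_hashes.values
        if PySem.Set.len digests == 1 then
          (acc.1 ++ [(g.1, digests.headD "")], acc.2)
        else (acc.1, acc.2 ++ [(g.1, signer_hashes.items)])) ([], []) := by
    unfold consensus_hashes_alt
    rw [hTrip]
  have hBfold : ((PySem.List.sorted (chOrd [] (chNorm manifests)) (fun x => x) false).map
          (fun k => (k, chGather (chNorm manifests) k))).foldl (fun acc g =>
        let signer_hashes := PySem.Dict.ofList g.2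
        let digests := PySem.Set.ofList signer_hashes.values
        if PySem.Set.len digests == 1 then
          (acc.1 ++ [(g.1, digests.headD "")], acc.2)
        else (acc.1, acc.2 ++ [(g.1, signer_hashes.items)])) ([], [])
      = (PySem.List.sorted (chOrd [] (chNorm manifests)) (fun x => x) false).foldl (fun acc f =>
          let digests := PySem.Set.ofList (PySem.Dict.mk (chGather (chNorm manifests) f)).values
          if PySem.Set.len digests == 1 then
            (acc.1 ++ [(f, digests.headD "")], acc.2)
          else (acc.1, acc.2 ++ [(f, (PySem.Dict.mk (chGather (chNorm manifests) f)).items)])) ([], []) := by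
    rw [List.foldl_map]
    congr 1
    funext acc k
    show (let signer_hashes := PySem.Dict.ofList (chGather (chNorm manifests) k)
          let digests := PySem.Set.ofList signer_hashes.values
          if PySem.Set.len digests == 1 then
            (acc.1 ++ [(k, digests.headD "")], acc.2)
          else (acc.1, acc.2 ++ [(k, signer_hashes.items)])) = _
    rw [chOfList_eq_mk (chGather (chNorm manifests) k)
        ((chGather_map_fst_sublist (chNorm manifests) k (chNorm_nodup_inner manifests)).nodup
          (chNorm_nodup_outer manifests))]
  rw [hA, hB, hSort, hGroups, hBfold, chSorted (chNorm manifests)]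
  exact chFinal (PySem.List.sorted (chOrd [] (chNorm manifests)) (fun x => x) false)
      (fun f => PySem.Dict.mk (chGather (chNorm manifests) f))
      PySem.Dict.empty PySem.Dict.empty
      (hNlt.imp ne_of_lt)
      (fun f _ => rfl) (fun f _ => rfl)
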